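-- pv_equiv track=rewrite | github.com/chancehl/advent-of-code-2025 | aoc/solutions/day10/solution.py | patterns_from_buttons
-- ===== SOURCE A (Python) =====
-- from itertools import combinations
--
-- def patterns_from_buttons(
--     buttons: list[list[int]], num_vars: int
-- ) -> dict[tuple[int, ...], int]:
--     out: dict[tuple[int, ...], int] = {}
--     num_buttons = len(buttons)
--
--     # convert button definitions to coeff tuples (0/1 per variable)
--     coeffs = [tuple(int(i in b) for i in range(num_vars)) for b in buttons]
--
--     for pattern_len in range(num_buttons + 1):
--         for btn_indices in combinations(range(num_buttons), pattern_len):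
--             # sum selected coeff tuples elementwise
--             pattern = tuple(
--                 map(sum, zip((0,) * num_vars, *(coeffs[i] for i in btn_indices)))
--             )
--             if pattern not in out:
--                 out[pattern] = pattern_len
--     return out
-- ===== SOURCE B (Python) =====
-- def patterns_from_buttons(buttons, num_vars):
--     # Layered frontier expansion with incremental elementwise sums:
--     # each size-k combination is extended by one larger button index,
--     # so no subset's pattern is ever re-summed from scratch.
--     n = len(buttons)
--     coeffs = [tuple(1 if i in b else 0 for i in range(num_vars)) for b in buttons]
--     zero = (0,) * max(num_vars, 0)
--     out = {zero: 0}
--     frontier = [(zero, -1)]  # (pattern sum, last button index used)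
--     for k in range(1, n + 1):
--         new_frontier = []
--         append = new_frontier.append
--         for s, last in frontier:
--             for j in range(last + 1, n):
--                 t = tuple([x + y for x, y in zip(s, coeffs[j])])
--                 append((t, j))
--                 if t not in out:
--                     out[t] = k
--         frontier = new_frontier
--     return out
-- ===== Notes on version B (the rewrite author's own statement) =====
-- stated objective: faster
-- what changed: Replaces per-subset re-summation over itertools.combinations with a layered frontier expansion: each size-k combination's pattern is obtained from its size-(k-1) parent by adding one coefficient row, so no pattern is ever summed from scratch.
import Mathlib
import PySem

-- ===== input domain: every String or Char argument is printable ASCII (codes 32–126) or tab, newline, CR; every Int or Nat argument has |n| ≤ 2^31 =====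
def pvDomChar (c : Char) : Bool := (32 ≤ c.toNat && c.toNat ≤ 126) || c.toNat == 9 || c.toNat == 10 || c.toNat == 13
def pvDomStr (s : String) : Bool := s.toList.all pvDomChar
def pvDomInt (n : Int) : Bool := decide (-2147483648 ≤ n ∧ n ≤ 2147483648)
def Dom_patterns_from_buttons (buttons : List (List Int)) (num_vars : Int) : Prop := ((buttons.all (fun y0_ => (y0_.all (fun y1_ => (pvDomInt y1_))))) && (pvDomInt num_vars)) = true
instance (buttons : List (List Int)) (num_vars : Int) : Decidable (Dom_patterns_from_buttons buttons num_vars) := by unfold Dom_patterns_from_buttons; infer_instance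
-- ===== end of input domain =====

-- B replaces A's per-subset re-summation (itertools.combinations + map(sum, zip(...)))
-- by a layered frontier expansion with incremental elementwise sums (objective: faster,
-- constant-factor: O(num_vars) instead of O(k*num_vars) work per size-k subset).

-- ===== PORT A =====

-- port of itertools.combinations(l, k): all k-element sublists of l, in Python's
-- lexicographic emission order
def pyCombs : List Int → Nat → List (List Int)
  | _, 0 => [[]]
  | [], _ + 1 => []
  | x :: xs, k + 1 => (pyCombs xs k).map (fun c => x :: c) ++ pyCombs xs (k + 1)

def patterns_from_buttons (buttons : List (List Int)) (num_vars : Int) : List (List Int × Int) :=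
  let num_buttons : Int := (buttons.length : Int)
  -- coeffs = [tuple(int(i in b) for i in range(num_vars)) for b in buttons]
  let coeffs : List (List Int) :=
    buttons.map (fun b =>
      (PySem.List.pyRange 0 num_vars 1).map (fun i => if b.contains i then (1 : Int) else 0))
  let out : PySem.Dict (List Int) Int :=
    (PySem.List.pyRange 0 (num_buttons + 1) 1).foldl
      (fun out pattern_len =>
        -- pattern_len ∈ range(num_buttons+1) is nonnegative, so .toNat is exact
        (pyCombs (PySem.List.pyRange 0 num_buttons 1) pattern_len.toNat).foldl
          (fun out btn_indices =>
            -- tuple(map(sum, zip((0,)*num_vars, *(coeffs[i] for i in btn_indices)))):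
            -- elementwise sum; exact because the zeros tuple and every coeffs row have
            -- the same length max(num_vars,0) ((0,)*n is empty for n ≤ 0, like .toNat);
            -- every i is in range(num_buttons), so pyGetD's default is never used
            let pattern : List Int :=
              btn_indices.foldl
                (fun acc i => List.zipWith (· + ·) acc (PySem.List.pyGetD coeffs i []))
                (List.replicate num_vars.toNat (0 : Int))
            if out.contains pattern then out else out.insert pattern pattern_len)
          out)
      PySem.Dict.empty
  out.items

-- ===== PORT B =====
def patterns_from_buttons_alt (buttons : List (List Int)) (num_vars : Int) : List (List Int × Int) :=
  let n : Int := (buttons.length : Int)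
  let coeffs : List (List Int) :=
    buttons.map (fun b =>
      (PySem.List.pyRange 0 num_vars 1).map (fun i => if b.contains i then (1 : Int) else 0))
  -- zero = (0,) * max(num_vars, 0)
  let zero : List Int := List.replicate (max num_vars 0).toNat (0 : Int)
  let st :=
    (PySem.List.pyRange 1 (n + 1) 1).foldl
      (fun (st : PySem.Dict (List Int) Int × List (List Int × Int)) k =>
        st.2.foldl
          (fun acc sl =>
            (PySem.List.pyRange (sl.2 + 1) n 1).foldl
              (fun (acc2 : PySem.Dict (List Int) Int × List (List Int × Int)) j =>
                -- t = [x + y for x, y in zip(s, coeffs[j])]; j < n, default unused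
                let t : List Int := List.zipWith (· + ·) sl.1 (PySem.List.pyGetD coeffs j [])
                let fr := acc2.2 ++ [(t, j)]
                (if acc2.1.contains t then acc2.1 else acc2.1.insert t k, fr))
              acc)
          (st.1, ([] : List (List Int × Int))))
      (PySem.Dict.empty.insert zero 0, [(zero, -1)])
  st.1.items

-- ===== PRECONDITION & SPEC =====
def Spec_patterns_from_buttons (buttons : List (List Int)) (num_vars : Int) (out : List (List Int × Int)) : Prop := out = patterns_from_buttons_alt buttons num_vars
instance (buttons : List (List Int)) (num_vars : Int) (out : List (List Int × Int)) : Decidable (Spec_patterns_from_buttons buttons num_vars out) := by unfold Spec_patterns_from_buttons; infer_instance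

-- ===== CLAIM (what is proved, stated in full; the proofs are below) =====
def Claim_equal_patterns_from_buttons : Prop := ∀ (buttons : List (List Int)) (num_vars : Int), Dom_patterns_from_buttons buttons num_vars → Spec_patterns_from_buttons buttons num_vars (patterns_from_buttons buttons num_vars)

-- ===== LEMMAS AND PROOFS =====

-- pattern of a combination c: elementwise sum of the selected coefficient rows
def patSum (coeffs : List (List Int)) (m : Nat) (c : List Int) : List Int :=
  c.foldl (fun acc i => List.zipWith (· + ·) acc (PySem.List.pyGetD coeffs i [])) (List.replicate m (0 : Int))

-- A's inner loop over one level: conditional insertion of each pattern with value k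
def insLevel (coeffs : List (List Int)) (m : Nat) (k : Int) (out : PySem.Dict (List Int) Int)
    (cs : List (List Int)) : PySem.Dict (List Int) Int :=
  cs.foldl (fun o c => if o.contains (patSum coeffs m c) then o else o.insert (patSum coeffs m c) k) out

-- B's frontier entry for a combination c
def pvRep (coeffs : List (List Int)) (m : Nat) (c : List Int) : List Int × Int :=
  (patSum coeffs m c, c.getLastD (-1))

-- extensions of a combination by one larger index (range form / filter form)
def pvExt (N : Int) (c : List Int) : List (List Int) :=
  (PySem.List.pyRange (c.getLastD (-1) + 1) N 1).map (fun j => c ++ [j])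

def pvExtF (l : List Int) (c : List Int) : List (List Int) :=
  (l.filter (fun j => decide (c.getLastD (-1) < j))).map (fun j => c ++ [j])

-- B's one outer step as a named function (definitionally the fold body of the port)
def pvStepB (coeffs : List (List Int)) (N : Int) :
    (PySem.Dict (List Int) Int × List (List Int × Int)) → Int →
    (PySem.Dict (List Int) Int × List (List Int × Int)) :=
  fun st k =>
    st.2.foldl
      (fun acc sl =>
        (PySem.List.pyRange (sl.2 + 1) N 1).foldl
          (fun acc2 j =>
            let t : List Int := List.zipWith (· + ·) sl.1 (PySem.List.pyGetD coeffs j [])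
            let fr := acc2.2 ++ [(t, j)]
            (if acc2.1.contains t then acc2.1 else acc2.1.insert t k, fr))
          acc)
      (st.1, ([] : List (List Int × Int)))

-- A's dict after levels 0..K-1
def pvAdict (coeffs : List (List Int)) (m : Nat) (N : Int) (K : Int) : PySem.Dict (List Int) Int :=
  (PySem.List.pyRange 0 K 1).foldl
    (fun o k => insLevel coeffs m k o (pyCombs (PySem.List.pyRange 0 N 1) k.toNat))
    PySem.Dict.empty

theorem patSum_concat (coeffs : List (List Int)) (m : Nat) (c : List Int) (j : Int) :
    patSum coeffs m (c ++ [j]) = List.zipWith (· + ·) (patSum coeffs m c) (PySem.List.pyGetD coeffs j []) := by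
  simp [patSum, List.foldl_append]

theorem pyCombs_mem {l c : List Int} {k : Nat} (h : c ∈ pyCombs l k) :
    c.Sublist l ∧ c.length = k := by
  
  induction l generalizing c k with
  | nil =>
    cases k with
    | zero => simp [pyCombs] at h; subst h; simp
    | succ k => simp [pyCombs] at h
  | cons x xs ih =>
    cases k with
    | zero => simp [pyCombs] at h; subst h; simp
    | succ k =>
      simp only [pyCombs, List.mem_append, List.mem_map] at h
      rcases h with ⟨c', hc', rfl⟩ | h
      · rcases ih hc' with ⟨hs, hl⟩
        exact ⟨List.Sublist.cons₂ x hs, by simp [hl]⟩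
      · rcases ih h with ⟨hs, hl⟩
        exact ⟨hs.cons x, hl⟩

theorem filter_pyRange_lt (d : Nat) (a b t : Int) (h : a + d = t + 1) :
    (PySem.List.pyRange a b 1).filter (fun j => decide (t < j)) = PySem.List.pyRange (t + 1) b 1 := by
  
  induction d generalizing a with
  | zero =>
    have ha : a = t + 1 := by omega
    subst ha
    apply List.filter_eq_self.2
    intro j hj
    have := (PySem.List.mem_pyRange_one).1 hj
    simp; omega
  | succ d ih =>
    have hat : a ≤ t := by omega
    by_cases hb : b ≤ a
    · rw [PySem.List.pyRange_one_eq_nil hb, PySem.List.pyRange_one_eq_nil (by omega)]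
      simp
    · rw [PySem.List.pyRange_one_cons (by omega)]
      rw [List.filter_cons_of_neg (by simp only [decide_eq_true_eq]; omega)]
      exact ih (a + 1) (by omega)

theorem pvExtF_cons_ext (x : Int) (xs : List Int) (hx : ∀ y ∈ xs, x < y)
    (h0' : ∀ y ∈ xs, (-1 : Int) < y) (c : List Int) (hsub : c.Sublist xs) :
    pvExtF (x :: xs) (x :: c) = (pvExtF xs c).map (fun c' => x :: c') := by
  cases c with
  | nil =>
    simp only [pvExtF, List.getLastD_cons, List.getLastD_nil]
    rw [List.filter_cons_of_neg (by simp)]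
    rw [List.filter_eq_self.2 (fun y hy => by simpa using hx y hy)]
    rw [List.filter_eq_self.2 (fun y hy => by simpa using h0' y hy)]
    simp
  | cons q qs =>
    have hmem : (q :: qs).getLastD x ∈ q :: qs := by
      rw [List.getLastD_cons]; exact List.getLastD_mem_cons
    have hgt : x < (q :: qs).getLastD x := hx _ (hsub.mem hmem)
    rw [List.getLastD_cons] at hgt
    simp only [pvExtF, List.getLastD_cons]
    rw [List.filter_cons_of_neg (by simp only [decide_eq_true_eq]; omega)]
    simp [List.map_map, Function.comp]

theorem pvExtF_cons_ne_nil (x : Int) (xs : List Int) (hx : ∀ y ∈ xs, x < y)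
    (c : List Int) (hsub : c.Sublist xs) (hne : c ≠ []) :
    pvExtF (x :: xs) c = pvExtF xs c := by
  cases c with
  | nil => exact absurd rfl hne
  | cons q qs =>
    have hmem : (q :: qs).getLastD (-1) ∈ q :: qs := by
      rw [List.getLastD_cons]; exact List.getLastD_mem_cons
    have hgt : x < (q :: qs).getLastD (-1) := hx _ (hsub.mem hmem)
    rw [List.getLastD_cons] at hgt
    simp only [pvExtF, List.getLastD_cons]
    rw [List.filter_cons_of_neg (by simp only [decide_eq_true_eq]; omega)]

theorem pyCombs_succ (l : List Int) (hl : l.Pairwise (· < ·)) (h0 : ∀ y ∈ l, (-1 : Int) < y)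
    (k : Nat) : pyCombs l (k + 1) = (pyCombs l k).flatMap (pvExtF l) := by
  induction l generalizing k with
  | nil =>
    cases k with
    | zero => simp [pyCombs, pvExtF]
    | succ k => simp [pyCombs]
  | cons x xs ih =>
    have hx : ∀ y ∈ xs, x < y := (List.pairwise_cons.1 hl).1
    have hl' : xs.Pairwise (· < ·) := (List.pairwise_cons.1 hl).2
    have h0' : ∀ y ∈ xs, (-1 : Int) < y := fun y hy => h0 y (List.mem_cons_of_mem x hy)
    cases k with
    | zero =>
      have base : pyCombs xs 1 = pvExtF xs [] := by
        rw [ih hl' h0' 0]; simp [pyCombs]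
      show (pyCombs xs 0).map (fun c => x :: c) ++ pyCombs xs 1 = _
      simp only [pyCombs, List.map_cons, List.map_nil, List.flatMap_cons, List.flatMap_nil,
        List.append_nil]
      rw [base]
      simp only [pvExtF, List.getLastD_nil]
      rw [List.filter_cons_of_pos (by simp [h0 x List.mem_cons_self])]
      rw [List.filter_eq_self.2 (fun y hy => by simpa using h0' y hy)]
      simp
    | succ k =>
      show (pyCombs xs (k + 1)).map (fun c => x :: c) ++ pyCombs xs (k + 2)
          = ((pyCombs xs k).map (fun c => x :: c) ++ pyCombs xs (k + 1)).flatMap (pvExtF (x :: xs))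
      rw [List.flatMap_append, List.flatMap_map]
      have e1 : (pyCombs xs k).flatMap (fun c => pvExtF (x :: xs) (x :: c))
          = (pyCombs xs k).flatMap (fun c => (pvExtF xs c).map (fun c' => x :: c')) :=
        List.flatMap_congr (fun c hc => pvExtF_cons_ext x xs hx h0' c (pyCombs_mem hc).1)
      have e2 : (pyCombs xs (k + 1)).flatMap (pvExtF (x :: xs))
          = (pyCombs xs (k + 1)).flatMap (pvExtF xs) :=
        List.flatMap_congr (fun c hc => pvExtF_cons_ne_nil x xs hx c (pyCombs_mem hc).1
          (by rcases pyCombs_mem hc with ⟨-, hlen⟩; intro h; subst h; simp at hlen))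
      rw [e1, e2, ← List.map_flatMap, ← ih hl' h0' k, ← ih hl' h0' (k + 1)]

theorem pyCombs_succ_range (N : Int) (k : Nat) :
    pyCombs (PySem.List.pyRange 0 N 1) (k + 1)
      = (pyCombs (PySem.List.pyRange 0 N 1) k).flatMap (pvExt N) := by
  
  rw [pyCombs_succ _ (PySem.List.pairwise_lt_pyRange_one 0 N)
      (fun y hy => by have := (PySem.List.mem_pyRange_one).1 hy; omega) k]
  apply List.flatMap_congr
  intro c hc
  rcases pyCombs_mem hc with ⟨hsub, -⟩
  have ht : (-1 : Int) ≤ c.getLastD (-1) := by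
    cases c with
    | nil => simp
    | cons q qs =>
      have hmem : (q :: qs).getLastD (-1) ∈ q :: qs := by
        rw [List.getLastD_cons]; exact List.getLastD_mem_cons
      have := (PySem.List.mem_pyRange_one).1 (hsub.mem hmem)
      omega
  unfold pvExtF pvExt
  rw [filter_pyRange_lt (c.getLastD (-1) + 1).toNat 0 N (c.getLastD (-1)) (by omega)]

theorem inner_fold (coeffs : List (List Int)) (m : Nat) (k : Int) (c : List Int) (js : List Int)
    (out : PySem.Dict (List Int) Int) (fr : List (List Int × Int)) :
    js.foldl
        (fun acc2 j =>
          let t : List Int := List.zipWith (· + ·) (patSum coeffs m c) (PySem.List.pyGetD coeffs j [])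
          let fr := acc2.2 ++ [(t, j)]
          (if acc2.1.contains t then acc2.1 else acc2.1.insert t k, fr))
        (out, fr)
      = (insLevel coeffs m k out (js.map (fun j => c ++ [j])),
         fr ++ (js.map (fun j => c ++ [j])).map (pvRep coeffs m)) := by
  
  induction js generalizing out fr with
  | nil => simp [insLevel]
  | cons j js ih =>
    simp only [List.foldl_cons, List.map_cons]
    rw [← patSum_concat]
    rw [ih]
    simp [insLevel, pvRep, List.append_assoc]

theorem insLevel_append (coeffs : List (List Int)) (m : Nat) (k : Int)
    (out : PySem.Dict (List Int) Int) (xs ys : List (List Int)) :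
    insLevel coeffs m k out (xs ++ ys) = insLevel coeffs m k (insLevel coeffs m k out xs) ys := by
  simp [insLevel, List.foldl_append]

theorem step_fold (coeffs : List (List Int)) (m : Nat) (N k : Int) (cs : List (List Int))
    (out : PySem.Dict (List Int) Int) :
    pvStepB coeffs N (out, cs.map (pvRep coeffs m)) k
      = (insLevel coeffs m k out (cs.flatMap (pvExt N)),
         (cs.flatMap (pvExt N)).map (pvRep coeffs m)) := by
  suffices h : ∀ (cs : List (List Int)) (out : PySem.Dict (List Int) Int)
      (fr0 : List (List Int × Int)),
      (cs.map (pvRep coeffs m)).foldl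
          (fun acc sl =>
            (PySem.List.pyRange (sl.2 + 1) N 1).foldl
              (fun acc2 j =>
                let t : List Int := List.zipWith (· + ·) sl.1 (PySem.List.pyGetD coeffs j [])
                let fr := acc2.2 ++ [(t, j)]
                (if acc2.1.contains t then acc2.1 else acc2.1.insert t k, fr))
              acc)
          (out, fr0)
        = (insLevel coeffs m k out (cs.flatMap (pvExt N)),
           fr0 ++ (cs.flatMap (pvExt N)).map (pvRep coeffs m)) by
    simpa [pvStepB] using h cs out []
  intro cs
  induction cs with
  | nil => intro out fr0; simp [insLevel]
  | cons c cs ih =>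
    intro out fr0
    simp only [List.map_cons, List.foldl_cons, pvRep]
    rw [inner_fold coeffs m k c (PySem.List.pyRange (c.getLastD (-1) + 1) N 1) out fr0]
    rw [ih]
    show _ = (insLevel coeffs m k out (pvExt N c ++ cs.flatMap (pvExt N)),
      fr0 ++ (pvExt N c ++ cs.flatMap (pvExt N)).map (pvRep coeffs m))
    rw [insLevel_append, List.map_append, List.append_assoc]
    rfl

theorem pv_main_inv (coeffs : List (List Int)) (m : Nat) (N : Int) (K : Nat) :
    (PySem.List.pyRange 1 ((K : Int) + 1) 1).foldl (pvStepB coeffs N)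
        (PySem.Dict.empty.insert (List.replicate m (0 : Int)) 0, [(List.replicate m (0 : Int), -1)])
      = (pvAdict coeffs m N ((K : Int) + 1),
         (pyCombs (PySem.List.pyRange 0 N 1) K).map (pvRep coeffs m)) := by
  induction K with
  | zero =>
    rw [show ((0 : Nat) : Int) + 1 = 1 by norm_num]
    rw [PySem.List.pyRange_one_eq_nil (by omega), List.foldl_nil]
    have h01 : PySem.List.pyRange 0 1 1 = [0] := by decide
    simp [pvAdict, h01, insLevel, pyCombs, patSum, pvRep]
  | succ K ih =>
    rw [show (((K + 1 : Nat)) : Int) = (K : Int) + 1 by push_cast; ring]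
    rw [PySem.List.pyRange_one_succ_right (by omega), List.foldl_append, ih]
    simp only [List.foldl_cons, List.foldl_nil]
    rw [step_fold coeffs m N ((K : Int) + 1) (pyCombs (PySem.List.pyRange 0 N 1) K)]
    rw [← pyCombs_succ_range N K]
    have hA : pvAdict coeffs m N (((K : Int) + 1) + 1)
        = insLevel coeffs m ((K : Int) + 1) (pvAdict coeffs m N ((K : Int) + 1))
            (pyCombs (PySem.List.pyRange 0 N 1) (K + 1)) := by
      unfold pvAdict
      rw [PySem.List.pyRange_one_succ_right (by omega), List.foldl_append]
      simp only [List.foldl_cons, List.foldl_nil]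
      rw [show ((K : Int) + 1).toNat = K + 1 by omega]
    rw [hA]

-- ===== VERDICT (by name: the statement is the Claim_ definition above) =====
theorem patterns_from_buttons_spec : Claim_equal_patterns_from_buttons := by
  intro buttons num_vars _
  show patterns_from_buttons buttons num_vars = patterns_from_buttons_alt buttons num_vars
  have hm : (max num_vars 0).toNat = num_vars.toNat := by omega
  have hA : patterns_from_buttons buttons num_vars
      = (pvAdict
          (buttons.map (fun b =>
            (PySem.List.pyRange 0 num_vars 1).map (fun i => if b.contains i then (1 : Int) else 0)))
          num_vars.toNat (buttons.length : Int) ((buttons.length : Int) + 1)).items := rfl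
  have hB : patterns_from_buttons_alt buttons num_vars
      = ((PySem.List.pyRange 1 ((buttons.length : Int) + 1) 1).foldl
          (pvStepB
            (buttons.map (fun b =>
              (PySem.List.pyRange 0 num_vars 1).map (fun i => if b.contains i then (1 : Int) else 0)))
            (buttons.length : Int))
          (PySem.Dict.empty.insert (List.replicate (max num_vars 0).toNat (0 : Int)) 0,
           [(List.replicate (max num_vars 0).toNat (0 : Int), -1)])).1.items := rfl
  rw [hA, hB, hm, pv_main_inv]
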